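-- pv_equiv track=rewrite | github.com/TheSlowHipster/DroppoAdvent | 2020/solutions/12-5.py | rowDecode
-- ===== SOURCE A (Python) =====
-- import math
--
-- def rowDecode(rows):
--     _max = 127
--     _min = 0
--     _mid = math.floor((_max + _min) / 2)
--     i = 0
--     ret = ""
--     for i in range(len(rows)):
--         if rows[i] == "F":
--             ret+="0"
--         elif rows[i] == "B":
--             ret += "1"
--     return int(ret,2)
-- ===== SOURCE B (Python) =====
-- def rowDecode(rows):
--     acc = 0
--     for c in rows:
--         if c == "F":
--             acc = acc * 2
--         elif c == "B":
--             acc = acc * 2 + 1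
--     return acc
-- ===== Notes on version B (the rewrite author's own statement) =====
-- stated objective: simpler
-- what changed: B drops the intermediate '0'/'1' string and int(_,2) parse and instead accumulates the value directly in one integer fold (acc*2 / acc*2+1).
-- outside the precondition, e.g. on rowDecode(''): A raises ValueError, B returns 0; on rowDecode('0'): A raises ValueError, B returns 0; on rowDecode('1'): A raises ValueError, B returns 0
import Mathlib
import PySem

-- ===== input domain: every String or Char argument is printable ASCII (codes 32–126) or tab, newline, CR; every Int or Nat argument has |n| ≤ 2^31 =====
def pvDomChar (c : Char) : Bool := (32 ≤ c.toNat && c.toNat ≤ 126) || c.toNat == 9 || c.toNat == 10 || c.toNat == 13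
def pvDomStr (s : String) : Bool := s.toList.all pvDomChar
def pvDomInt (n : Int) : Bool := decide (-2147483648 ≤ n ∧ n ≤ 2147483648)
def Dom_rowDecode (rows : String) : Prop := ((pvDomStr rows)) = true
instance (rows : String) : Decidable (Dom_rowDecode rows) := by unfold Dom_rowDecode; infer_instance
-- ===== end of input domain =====

-- B replaces A's build-a-binary-string-then-int(_,2) by a single integer accumulator fold (simpler).

-- ===== PORT A =====
-- int(ret,2) of A is ported as a fold over the built digit list; exact whenever ret is
-- nonempty (guaranteed by Pre_rowDecode); Python raises ValueError on the empty string.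
def rowDecode (rows : String) : Int :=
  let ret : List Char := rows.toList.foldl
    (fun r c => if c = 'F' then r ++ ['0'] else if c = 'B' then r ++ ['1'] else r) []
  ret.foldl (fun a c => a * 2 + (if c = '1' then 1 else 0)) 0

-- ===== PORT B =====
def rowDecode_alt (rows : String) : Int :=
  rows.toList.foldl
    (fun acc c => if c = 'F' then acc * 2 else if c = 'B' then acc * 2 + 1 else acc) 0

-- ===== PRECONDITION & SPEC =====
-- Pre_ excludes strings with no 'F' and no 'B': there A's int('',2) raises ValueError.
def Pre_rowDecode (rows : String) : Prop :=
  (rows.toList.any (fun c => c == 'F' || c == 'B')) = true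
instance (rows : String) : Decidable (Pre_rowDecode rows) := by unfold Pre_rowDecode; infer_instance
def pvWitness_rowDecode : String := "FBFBBFF"

def Spec_rowDecode (rows : String) (out : Int) : Prop := out = rowDecode_alt rows
instance (rows : String) (out : Int) : Decidable (Spec_rowDecode rows out) := by unfold Spec_rowDecode; infer_instance

-- ===== CLAIM (what is proved, stated in full; the proofs are below) =====
def Claim_equal_rowDecode : Prop := ∀ (rows : String), Dom_rowDecode rows → Pre_rowDecode rows → Spec_rowDecode rows (rowDecode rows)

-- ===== LEMMAS AND PROOFS =====
-- parse r = value of the digit list r read in base 2 (A's int(ret,2) on its output).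
def pvParse (r : List Char) : Int :=
  r.foldl (fun a c => a * 2 + (if c = '1' then 1 else 0)) 0

theorem pvParse_append (r : List Char) (c : Char) :
    pvParse (r ++ [c]) = pvParse r * 2 + (if c = '1' then 1 else 0) := by
  simp [pvParse, List.foldl_append]

-- loop invariant: parsing A's partially built string equals B's accumulator
theorem pvLoop (l : List Char) : ∀ (r : List Char),
    pvParse (l.foldl (fun r c => if c = 'F' then r ++ ['0'] else if c = 'B' then r ++ ['1'] else r) r)
      = l.foldl (fun acc c => if c = 'F' then acc * 2 else if c = 'B' then acc * 2 + 1 else acc) (pvParse r) := by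
  induction l with
  | nil => intro r; simp
  | cons c l ih =>
    intro r
    by_cases hF : c = 'F'
    · simp [hF, List.foldl_cons, ih, pvParse_append]
    · by_cases hB : c = 'B'
      · simp [hB, List.foldl_cons, ih, pvParse_append]
      · simp [hF, hB, List.foldl_cons, ih]

-- ===== VERDICT (by name: the statement is the Claim_ definition above) =====
theorem rowDecode_spec : Claim_equal_rowDecode := by
  intro rows _ _
  show rowDecode rows = rowDecode_alt rows
  have h := pvLoop rows.toList []
  simpa [rowDecode, rowDecode_alt, pvParse] using h
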